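-- pv_equiv track=rewrite | github.com/aimhigh53/AlgoWing | JoonMo/2주차/5203_베이비진_게임/solution.py | check_run
-- ===== SOURCE A (Python) =====
-- def check_run(lst):
--     temp = 0
--     for i in lst:
--         if i != 0:
--             temp += 1
--             if temp >= 3:
--                 return True
--         else:
--             temp = 0
--     return False
-- ===== SOURCE B (Python) =====
-- def check_run(lst):
--     lst = list(lst)
--     for i in range(len(lst) - 2):
--         if lst[i] != 0 and lst[i + 1] != 0 and lst[i + 2] != 0:
--             return True
--     return False
-- ===== Notes on version B (the rewrite author's own statement) =====
-- stated objective: alternative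
-- what changed: Replaces the stateful streak counter that resets on zeros by a direct scan of overlapping index windows of three, returning as soon as one window is all non-zero.
import Mathlib
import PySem

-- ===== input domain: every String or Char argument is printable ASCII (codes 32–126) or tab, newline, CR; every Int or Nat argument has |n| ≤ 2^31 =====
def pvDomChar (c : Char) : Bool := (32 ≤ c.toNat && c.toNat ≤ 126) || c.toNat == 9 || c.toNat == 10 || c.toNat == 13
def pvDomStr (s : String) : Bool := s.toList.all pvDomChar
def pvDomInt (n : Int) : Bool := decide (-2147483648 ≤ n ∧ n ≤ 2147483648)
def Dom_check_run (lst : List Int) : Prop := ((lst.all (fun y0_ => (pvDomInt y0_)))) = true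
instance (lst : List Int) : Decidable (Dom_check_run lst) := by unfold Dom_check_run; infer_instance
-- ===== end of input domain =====

-- B replaces A's streak counter with a direct scan of overlapping three-element index windows (alternative decomposition, same cost).


-- ===== PORT A =====
def checkRunLoop (temp : Nat) : List Int → Bool
  | [] => false
  | i :: rest =>
    if i ≠ 0 then
      if temp + 1 ≥ 3 then true else checkRunLoop (temp + 1) rest
    else checkRunLoop 0 rest

def check_run (lst : List Int) : Bool := checkRunLoop 0 lst

-- ===== PORT B =====
-- for i in range(len(lst)-2): direct indexing of in-range positions (getD; indices are always in range)
def check_run_alt (lst : List Int) : Bool :=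
  (List.range (lst.length - 2)).any (fun i =>
    decide (lst.getD i 0 ≠ 0) && decide (lst.getD (i + 1) 0 ≠ 0) && decide (lst.getD (i + 2) 0 ≠ 0))

-- ===== PRECONDITION & SPEC =====
def Spec_check_run (lst : List Int) (out : Bool) : Prop := out = check_run_alt lst
instance (lst : List Int) (out : Bool) : Decidable (Spec_check_run lst out) := by unfold Spec_check_run; infer_instance

-- ===== CLAIM (what is proved, stated in full; the proofs are below) =====
def Claim_equal_check_run : Prop := ∀ (lst : List Int), Dom_check_run lst → Spec_check_run lst (check_run lst)

-- ===== LEMMAS AND PROOFS =====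

-- ===== VERDICT (by name: the statement is the Claim_ definition above) =====
-- window predicate: three consecutive non-zero entries starting at i
def Win (l : List Int) (i : Nat) : Prop :=
  l.getD i 0 ≠ 0 ∧ l.getD (i + 1) 0 ≠ 0 ∧ l.getD (i + 2) 0 ≠ 0

theorem alt_iff (l : List Int) :
    check_run_alt l = true ↔ ∃ i, i < l.length - 2 ∧ Win l i := by
  simp [check_run_alt, List.any_eq_true, Win, and_assoc]

theorem loop_iff (l : List Int) : ∀ t : Nat, t ≤ 2 →
    (checkRunLoop t l = true ↔
      ((3 - t ≤ l.length ∧ ∀ j, j < 3 - t → l.getD j 0 ≠ 0) ∨ ∃ i, i < l.length - 2 ∧ Win l i)) := by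
  induction l with
  | nil =>
    intro t ht
    simp only [checkRunLoop]
    constructor
    · intro h; exact absurd h (by simp)
    · rintro (⟨h, _⟩ | ⟨i, hi, _⟩)
      · simp at h; omega
      · simp at hi
  | cons a rest ih =>
    intro t ht
    by_cases ha : a = 0
    · subst ha
      simp only [checkRunLoop, ne_eq, not_true_eq_false, if_false]
      rw [ih 0 (by omega)]
      constructor
      · rintro (⟨hlen, hall⟩ | ⟨i, hi, hw⟩)
        · refine Or.inr ⟨1, by simp; omega, ?_⟩
          simp only [Win, List.getD_cons_succ]
          exact ⟨hall 0 (by omega), hall 1 (by omega), hall 2 (by omega)⟩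
        · refine Or.inr ⟨i + 1, by simp; omega, ?_⟩
          simpa [Win, List.getD_cons_succ] using hw
      · rintro (⟨_, hall⟩ | ⟨i, hi, hw⟩)
        · exact absurd (hall 0 (by omega)) (by simp)
        · cases i with
          | zero => exact absurd hw.1 (by simp)
          | succ i =>
            simp only [Win, List.getD_cons_succ] at hw
            refine Or.inr ⟨i, by simp at hi; omega, hw⟩
    · by_cases h2 : t = 2
      · subst h2
        simp only [checkRunLoop, if_pos ha]
        constructor
        · intro _
          refine Or.inl ⟨by simp only [List.length_cons]; omega, ?_⟩
          intro j hj
          have hj1 : j = 0 := by omega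
          subst hj1
          simpa using ha
        · intro _; simp
      · have hlt : t + 1 ≤ 2 := by omega
        simp only [checkRunLoop, if_pos ha]
        rw [if_neg (by omega), ih (t + 1) hlt]
        constructor
        · rintro (⟨hlen, hall⟩ | ⟨i, hi, hw⟩)
          · refine Or.inl ⟨by simp; omega, ?_⟩
            intro j hj
            cases j with
            | zero => simpa using ha
            | succ j => simp only [List.getD_cons_succ]; exact hall j (by omega)
          · refine Or.inr ⟨i + 1, by simp; omega, ?_⟩
            simpa [Win, List.getD_cons_succ] using hw
        · rintro (⟨hlen, hall⟩ | ⟨i, hi, hw⟩)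
          · simp only [List.length_cons] at hlen
            refine Or.inl ⟨by omega, ?_⟩
            intro j hj
            have := hall (j + 1) (by omega)
            simpa [List.getD_cons_succ] using this
          · cases i with
            | zero =>
              simp only [Win, List.getD_cons_zero, List.getD_cons_succ] at hw
              simp only [List.length_cons] at hi
              refine Or.inl ⟨by omega, ?_⟩
              intro j hj
              have hj2 : j < 2 := by omega
              interval_cases j
              · exact hw.2.1
              · exact hw.2.2
            | succ i =>
              simp only [Win, List.getD_cons_succ] at hw
              refine Or.inr ⟨i, by simp at hi; omega, hw⟩

theorem check_run_spec : Claim_equal_check_run := by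
  intro lst _
  unfold Spec_check_run
  rw [Bool.eq_iff_iff, alt_iff]
  unfold check_run
  rw [loop_iff lst 0 (by omega)]
  constructor
  · rintro (⟨hlen, hall⟩ | h)
    · exact ⟨0, by omega, hall 0 (by omega), hall 1 (by omega), hall 2 (by omega)⟩
    · exact h
  · exact Or.inr
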